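-- pv_equiv track=rewrite | github.com/Libertai/liberclaw-agent | context.py | _parse_skill_metadata
-- ===== SOURCE A (Python) =====
-- def _parse_skill_metadata(dir_name: str, content: str) -> tuple[str, str]:
--     """Extract skill name and description from SKILL.md content.
--
--     Supports both agentskills.io format (YAML frontmatter with name/description)
--     and legacy format (# Title followed by first non-heading paragraph).
--     """
--     lines = content.splitlines()
--
--     # Detect YAML frontmatter (--- delimited block at the start)
--     if lines and lines[0].strip() == "---":
--         fm_name = ""
--         fm_description = ""
--         for i, line in enumerate(lines[1:], 1):
--             if line.strip() == "---":
--                 # End of frontmatter — use parsed values if we got a description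
--                 if fm_description:
--                     return fm_name or dir_name, fm_description
--                 # No description in frontmatter, fall through to legacy parsing
--                 # but skip past the frontmatter block
--                 return _parse_legacy_description(dir_name, lines[i + 1 :])
--             stripped = line.strip()
--             if stripped.startswith("name:"):
--                 fm_name = stripped[5:].strip().strip("\"'")
--             elif stripped.startswith("description:"):
--                 fm_description = stripped[12:].strip().strip("\"'")
--
--     # No frontmatter — legacy format
--     return _parse_legacy_description(dir_name, lines)
--
-- def _parse_legacy_description(
--     dir_name: str, lines: list[str]
-- ) -> tuple[str, str]:
--     """Extract description as the first non-empty, non-heading line."""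
--     for line in lines:
--         stripped = line.strip()
--         if stripped and not stripped.startswith("#"):
--             return dir_name, stripped
--     return dir_name, ""
-- ===== SOURCE B (Python) =====
-- def _parse_legacy_description(dir_name, lines):
--     """Description = first stripped line that is non-empty and not a heading."""
--     return dir_name, next(
--         (s for s in map(str.strip, lines) if s and not s.startswith("#")), ""
--     )
--
--
-- def _parse_skill_metadata(dir_name: str, content: str) -> tuple[str, str]:
--     lines = content.splitlines()
--     stripped = [ln.strip() for ln in lines]
--     if not stripped or stripped[0] != "---":
--         return _parse_legacy_description(dir_name, lines)
--     try:
--         close = stripped[1:].index("---") + 1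
--     except ValueError:
--         # unclosed frontmatter: legacy scan over ALL lines
--         return _parse_legacy_description(dir_name, lines)
--     fm = {}
--     for s in stripped[1:close]:
--         if s.startswith("name:"):
--             fm["name"] = s[5:].strip().strip("\"'")
--         elif s.startswith("description:"):
--             fm["description"] = s[12:].strip().strip("\"'")
--     if fm.get("description", ""):
--         return fm.get("name", "") or dir_name, fm["description"]
--     return _parse_legacy_description(dir_name, lines[close + 1:])
-- ===== Notes on version B (the rewrite author's own statement) =====
-- stated objective: idiomatic
-- what changed: B replaces A's single enumerate loop with in-loop returns by a two-phase decomposition: find the closing '---' with list.index over a precomputed stripped-line list, build the frontmatter fields as a dict over the sliced block, then decide; the legacy scan becomes a next() over a generator instead of a for loop.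
import Mathlib
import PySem

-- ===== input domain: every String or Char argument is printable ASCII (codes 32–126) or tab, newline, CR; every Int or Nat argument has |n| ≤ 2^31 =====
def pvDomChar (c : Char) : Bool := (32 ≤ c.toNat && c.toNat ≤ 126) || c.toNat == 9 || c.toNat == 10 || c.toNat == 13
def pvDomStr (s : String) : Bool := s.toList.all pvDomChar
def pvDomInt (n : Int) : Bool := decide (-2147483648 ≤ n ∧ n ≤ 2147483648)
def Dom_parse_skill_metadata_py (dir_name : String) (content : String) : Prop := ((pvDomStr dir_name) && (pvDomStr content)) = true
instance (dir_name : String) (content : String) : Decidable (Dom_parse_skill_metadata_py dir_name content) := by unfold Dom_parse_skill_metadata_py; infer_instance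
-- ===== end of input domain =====

-- B: two-phase re-decomposition of A's frontmatter parser (find closing '---' by index, build a dict over the sliced block, legacy scan via find?); same values, same cost.


-- ===== PORT A =====
-- _parse_legacy_description: loop over lines, return at the first non-empty non-heading stripped line
def pyLegacyA (dir_name : String) : List String → String × String
  | [] => (dir_name, "")
  | line :: rest =>
    let stripped := PySem.Str.strip line
    if stripped ≠ "" ∧ PySem.Str.startswith stripped "#" = false then (dir_name, stripped)
    else pyLegacyA dir_name rest

-- the frontmatter for-loop of A (over lines[1:], accumulating fm_name/fm_description);
-- none = the loop fell through without meeting a closing '---' (A then does legacy over the FULL lines)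
def pyFmLoopA (dir_name : String) (fm_name fm_desc : String) : List String → Option (String × String)
  | [] => none
  | line :: rs =>
    if PySem.Str.strip line = "---" then
      if fm_desc ≠ "" then some ((if fm_name ≠ "" then fm_name else dir_name), fm_desc)
      else some (pyLegacyA dir_name rs)   -- lines[i+1:] is exactly the remaining suffix rs
    else
      let stripped := PySem.Str.strip line
      if PySem.Str.startswith stripped "name:" then
        pyFmLoopA dir_name (PySem.Str.stripChars (PySem.Str.strip (PySem.Str.slice stripped (some 5) none)) "\"'") fm_desc rs
      else if PySem.Str.startswith stripped "description:" then
        pyFmLoopA dir_name fm_name (PySem.Str.stripChars (PySem.Str.strip (PySem.Str.slice stripped (some 12) none)) "\"'") rs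
      else
        pyFmLoopA dir_name fm_name fm_desc rs

def parse_skill_metadata_py (dir_name : String) (content : String) : String × String :=
  let lines := PySem.Str.splitlines content
  match lines with
  | [] => pyLegacyA dir_name lines
  | l0 :: rest =>
    if PySem.Str.strip l0 = "---" then
      match pyFmLoopA dir_name "" "" rest with
      | some r => r
      | none => pyLegacyA dir_name lines
    else pyLegacyA dir_name lines

-- ===== PORT B =====
-- legacy scan as next() over a generator: first stripped line that is non-empty and not a heading
def legacyB (dir_name : String) (lines : List String) : String × String :=
  (dir_name, ((lines.map PySem.Str.strip).find? (fun s => decide (s ≠ "") && !PySem.Str.startswith s "#")).getD "")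

-- one step of B's dict-building loop over the frontmatter block
def fmInsertB (d : PySem.Dict String String) (s : String) : PySem.Dict String String :=
  if PySem.Str.startswith s "name:" then
    d.insert "name" (PySem.Str.stripChars (PySem.Str.strip (PySem.Str.slice s (some 5) none)) "\"'")
  else if PySem.Str.startswith s "description:" then
    d.insert "description" (PySem.Str.stripChars (PySem.Str.strip (PySem.Str.slice s (some 12) none)) "\"'")
  else d

def parse_skill_metadata_py_alt (dir_name : String) (content : String) : String × String :=
  let lines := PySem.Str.splitlines content
  let stripped := lines.map PySem.Str.strip
  if stripped.head? ≠ some "---" then legacyB dir_name lines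
  else
    match PySem.List.index? (PySem.List.slice stripped (some 1) none) "---" with
    | none => legacyB dir_name lines
    | some j =>
      let close : Nat := j + 1
      let fm := (PySem.List.slice stripped (some 1) (some (close : Int))).foldl fmInsertB PySem.Dict.empty
      if fm.getD "description" "" ≠ "" then
        ((if fm.getD "name" "" ≠ "" then fm.getD "name" "" else dir_name), fm.getD "description" "")
      else legacyB dir_name (PySem.List.slice lines (some ((close : Int) + 1)) none)

-- ===== PRECONDITION & SPEC =====
def Spec_parse_skill_metadata_py (dir_name : String) (content : String) (out : String × String) : Prop := out = parse_skill_metadata_py_alt dir_name content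
instance (dir_name : String) (content : String) (out : String × String) : Decidable (Spec_parse_skill_metadata_py dir_name content out) := by unfold Spec_parse_skill_metadata_py; infer_instance

-- ===== CLAIM (what is proved, stated in full; the proofs are below) =====
def Claim_equal_parse_skill_metadata_py : Prop := ∀ (dir_name : String) (content : String), Dom_parse_skill_metadata_py dir_name content → Spec_parse_skill_metadata_py dir_name content (parse_skill_metadata_py dir_name content)

-- ===== LEMMAS AND PROOFS =====

set_option maxHeartbeats 1000000 in
theorem legacy_eq (d : String) (lines : List String) : pyLegacyA d lines = legacyB d lines := by
  induction lines with
  | nil => rfl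
  | cons l rest ih =>
    have ih' : pyLegacyA d rest =
        (d, ((rest.map PySem.Str.strip).find? (fun s => decide (s ≠ "") && !PySem.Str.startswith s "#")).getD "") := ih
    by_cases he : PySem.Str.strip l = ""
    · simp [pyLegacyA, legacyB, he, ih']
    · by_cases hs : PySem.Str.startswith (PySem.Str.strip l) "#" = true
      · have hs' : PySem.Chars.startswith (PySem.Chars.strip l.toList) ['#'] = true := by simpa using hs
        simp [pyLegacyA, legacyB, he, hs', ih']
      · have hs2 : PySem.Str.startswith (PySem.Str.strip l) "#" = false := by simpa using hs
        have hs' : PySem.Chars.startswith (PySem.Chars.strip l.toList) ['#'] = false := by simpa using hs2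
        simp [pyLegacyA, legacyB, he, hs']

set_option maxHeartbeats 1000000 in
theorem loop_eq (rest : List String) (d : String) (dict : PySem.Dict String String) :
    pyFmLoopA d (dict.getD "name" "") (dict.getD "description" "") rest =
      (match PySem.List.index? (rest.map PySem.Str.strip) "---" with
       | none => none
       | some j =>
         let fm := ((rest.map PySem.Str.strip).take j).foldl fmInsertB dict
         some (if fm.getD "description" "" ≠ "" then
                 ((if fm.getD "name" "" ≠ "" then fm.getD "name" "" else d), fm.getD "description" "")
               else legacyB d (rest.drop (j + 1)))) := by
  induction rest generalizing dict with
  | nil => rfl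
  | cons line rs ih =>
    by_cases hdelim : PySem.Str.strip line = "---"
    · simp only [pyFmLoopA, hdelim, if_pos, List.map_cons]
      rw [PySem.List.index?_cons_self]
      simp only [List.take_zero, List.foldl_nil, List.drop_succ_cons, List.drop_zero]
      rw [legacy_eq]
      by_cases hdes : dict.getD "description" "" ≠ "" <;> simp [hdes]
    · have hstep : pyFmLoopA d (dict.getD "name" "") (dict.getD "description" "") (line :: rs) =
          pyFmLoopA d ((fmInsertB dict (PySem.Str.strip line)).getD "name" "")
            ((fmInsertB dict (PySem.Str.strip line)).getD "description" "") rs := by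
        simp only [pyFmLoopA, hdelim, fmInsertB]
        by_cases hn : PySem.Str.startswith (PySem.Str.strip line) "name:" = true
        · have hn' : PySem.Chars.startswith (PySem.Chars.strip line.toList) ['n','a','m','e',':'] = true := by
            simpa using hn
          simp [hn', PySem.Dict.getD_insert]
        · have hn' : PySem.Chars.startswith (PySem.Chars.strip line.toList) ['n','a','m','e',':'] = false := by
            simpa using (by simpa using hn : PySem.Str.startswith (PySem.Str.strip line) "name:" = false)
          by_cases hdsc : PySem.Str.startswith (PySem.Str.strip line) "description:" = true
          · have hd' : PySem.Chars.startswith (PySem.Chars.strip line.toList)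
                ['d','e','s','c','r','i','p','t','i','o','n',':'] = true := by simpa using hdsc
            simp [hn', hd', PySem.Dict.getD_insert]
          · have hd' : PySem.Chars.startswith (PySem.Chars.strip line.toList)
                ['d','e','s','c','r','i','p','t','i','o','n',':'] = false := by
              simpa using (by simpa using hdsc : PySem.Str.startswith (PySem.Str.strip line) "description:" = false)
            simp [hn', hd']
      rw [hstep, ih]
      simp only [List.map_cons]
      rw [PySem.List.index?_cons_of_ne _ hdelim]
      cases hidx : PySem.List.index? (rs.map PySem.Str.strip) "---" with
      | none => simp
      | some j => simp

-- slice/head bridging facts used only in the final assembly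
theorem slice_one_none (xs : List String) : PySem.List.slice xs (some 1) none = xs.drop 1 := by
  simpa using PySem.List.slice_from_natCast (a := 1) (xs := xs)

theorem slice_block (xs : List String) (j : Nat) :
    PySem.List.slice xs (some 1) (some ((j : Int) + 1)) = (xs.drop 1).take j := by
  have h : ((j : Int) + 1) = ((j + 1 : Nat) : Int) := by push_cast; ring
  rw [h]
  simpa using PySem.List.slice_natCast (a := 1) (b := j + 1) (xs := xs)

theorem slice_after (xs : List String) (j : Nat) :
    PySem.List.slice xs (some ((j : Int) + 1 + 1)) none = xs.drop (j + 2) := by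
  have h : ((j : Int) + 1 + 1) = ((j + 2 : Nat) : Int) := by push_cast; ring
  rw [h, PySem.List.slice_from_natCast]

set_option maxHeartbeats 1000000 in
theorem parse_skill_metadata_py_spec : Claim_equal_parse_skill_metadata_py := by
  intro dir_name content _
  unfold Spec_parse_skill_metadata_py parse_skill_metadata_py parse_skill_metadata_py_alt
  cases hls : PySem.Str.splitlines content with
  | nil => simp [legacy_eq]
  | cons l0 rest =>
    by_cases h0 : PySem.Str.strip l0 = "---"
    · have hloop := loop_eq rest dir_name PySem.Dict.empty
      simp only [PySem.Dict.getD_empty] at hloop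
      cases hidx : PySem.List.index? (rest.map PySem.Str.strip) "---" with
      | none =>
        rw [hidx] at hloop
        simp only [PySem.List.index?_eq_idxOf?] at hidx
        simp [h0, hloop, hidx, slice_one_none, legacy_eq]
      | some j =>
        rw [hidx] at hloop
        simp only [PySem.List.index?_eq_idxOf?] at hidx
        simp [h0, hloop, hidx, slice_one_none, slice_block, slice_after]
    · simp [h0, legacy_eq]
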